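-- pv_equiv track=rewrite | github.com/GIST-DSLab/GFN_to_ARC | gfn/src/trajectory_transformer_experiment/simple_3x3_test.py | execute_actions
-- ===== SOURCE A (Python) =====
-- from typing import List, Dict, Any, Tuple
--
-- def execute_actions(grid: List[List[int]], actions: List[int]) -> List[List[int]]:
--     """액션 시퀀스를 그리드에 적용"""
--     current_grid = [row[:] for row in grid]  # 복사
--
--     for action in actions:
--         if action == 0:  # 회전 없음
--             continue
--         elif action == 1:  # 왼쪽 회전 (90도)
--             current_grid = [[current_grid[j][2-i] for j in range(3)] for i in range(3)]
--         elif action == 2:  # 수평 뒤집기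
--             current_grid = [row[::-1] for row in current_grid]
--         elif action == 3:  # 수직 뒤집기
--             current_grid = current_grid[::-1]
--         elif action == 4:  # 제출
--             break
--
--     return current_grid
-- ===== SOURCE B (Python) =====
-- from typing import List
--
--
-- def execute_actions(grid: List[List[int]], actions: List[int]) -> List[List[int]]:
--     # O(1) state per action: flip parities until the first rotation, then a
--     # 3x3 output->source coordinate permutation; the grid is materialized once.
--     fr = False  # vertical flip parity (before any rotation)
--     fc = False  # horizontal flip parity (before any rotation)
--     perm = None  # after the first rotation: output cell -> pre-rotation cell
--     for action in actions:
--         if action == 4: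
--             break
--         elif action == 1:
--             if perm is None:
--                 perm = [(j, 2 - i) for i in range(3) for j in range(3)]
--             else:
--                 perm = [perm[3 * j + (2 - i)] for i in range(3) for j in range(3)]
--         elif action == 2:
--             if perm is None:
--                 fc = not fc
--             else:
--                 perm = [perm[3 * i + (2 - j)] for i in range(3) for j in range(3)]
--         elif action == 3:
--             if perm is None:
--                 fr = not fr
--             else:
--                 perm = [perm[3 * (2 - i) + j] for i in range(3) for j in range(3)]
--     if perm is None:
--         rows = grid[::-1] if fr else grid
--         return [row[::-1] if fc else row[:] for row in rows]
--     out = []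
--     for i in range(3):
--         r = []
--         for j in range(3):
--             si, sj = perm[3 * i + j]
--             row = grid[-1 - si] if fr else grid[si]
--             r.append(row[len(row) - 1 - sj] if fc else row[sj])
--         out.append(r)
--     return out
-- ===== Notes on version B (the rewrite author's own statement) =====
-- stated objective: alternative
-- what changed: B keeps O(1) state per action (flip parities until the first rotation, then a single 3x3 output-to-source coordinate permutation composed per action) and materializes the grid once from the untouched input, instead of rebuilding the whole grid after every action.
import Mathlib
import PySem

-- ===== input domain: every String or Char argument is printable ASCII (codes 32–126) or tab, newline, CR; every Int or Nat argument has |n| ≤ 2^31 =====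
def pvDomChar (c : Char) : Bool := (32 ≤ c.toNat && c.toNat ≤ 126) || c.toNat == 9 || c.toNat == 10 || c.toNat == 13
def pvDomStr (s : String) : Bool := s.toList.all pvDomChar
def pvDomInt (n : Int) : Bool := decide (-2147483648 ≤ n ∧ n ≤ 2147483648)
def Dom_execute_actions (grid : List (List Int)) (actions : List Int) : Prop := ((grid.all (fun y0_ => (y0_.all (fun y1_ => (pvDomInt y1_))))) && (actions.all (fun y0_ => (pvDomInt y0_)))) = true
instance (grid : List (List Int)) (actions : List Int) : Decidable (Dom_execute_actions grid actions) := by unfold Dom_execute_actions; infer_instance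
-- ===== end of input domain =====

-- B keeps O(1) state (flip parities, then one 3x3 output->source coordinate permutation)
-- and materializes the grid once, instead of rebuilding the whole grid on every action.


-- ===== PORT A =====
-- current_grid[j]  (a row; the [] default is reachable only outside Pre_)
def pvRowA (g : List (List Int)) (i : Int) : List Int := (PySem.List.pyGet? g i).getD []
-- row[k]  (the 0 default is reachable only outside Pre_)
def pvCellA (row : List Int) (k : Int) : Int := (PySem.List.pyGet? row k).getD 0
-- the for-loop of A, with break returning the current grid
def pvLoopA (cur : List (List Int)) : List Int → List (List Int)
  | [] => cur
  | a :: rest =>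
    if a == 0 then pvLoopA cur rest
    else if a == 1 then
      pvLoopA ((PySem.List.pyRange 0 3 1).map (fun i =>
        (PySem.List.pyRange 0 3 1).map (fun j => pvCellA (pvRowA cur j) (2 - i)))) rest
    else if a == 2 then
      pvLoopA (cur.map (fun row => (PySem.List.slice? row none none (-1)).getD [])) rest
    else if a == 3 then
      pvLoopA ((PySem.List.slice? cur none none (-1)).getD []) rest
    else if a == 4 then cur
    else pvLoopA cur rest

def execute_actions (grid : List (List Int)) (actions : List Int) : List (List Int) :=
  -- [row[:] for row in grid]
  pvLoopA (grid.map (fun row => PySem.List.slice row none none)) actions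

-- ===== PORT B =====
-- perm[k]  (the default is never reached: indices are always in range)
def pvPGet (p : List (Int × Int)) (k : Int) : Int × Int := (PySem.List.pyGet? p k).getD (0, 0)
-- the for-loop of B: state is (fr, fc, perm) exactly as in Source B
def pvLoopB (fr fc : Bool) (perm : Option (List (Int × Int))) :
    List Int → Bool × Bool × Option (List (Int × Int))
  | [] => (fr, fc, perm)
  | a :: rest =>
    if a == 4 then (fr, fc, perm)
    else if a == 1 then
      match perm with
      | none => pvLoopB fr fc (some ((PySem.List.pyRange 0 3 1).flatMap (fun i =>
          (PySem.List.pyRange 0 3 1).map (fun j => ((j : Int), 2 - i))))) rest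
      | some p => pvLoopB fr fc (some ((PySem.List.pyRange 0 3 1).flatMap (fun i =>
          (PySem.List.pyRange 0 3 1).map (fun j => pvPGet p (3 * j + (2 - i)))))) rest
    else if a == 2 then
      match perm with
      | none => pvLoopB fr (!fc) none rest
      | some p => pvLoopB fr fc (some ((PySem.List.pyRange 0 3 1).flatMap (fun i =>
          (PySem.List.pyRange 0 3 1).map (fun j => pvPGet p (3 * i + (2 - j)))))) rest
    else if a == 3 then
      match perm with
      | none => pvLoopB (!fr) fc none rest
      | some p => pvLoopB fr fc (some ((PySem.List.pyRange 0 3 1).flatMap (fun i =>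
          (PySem.List.pyRange 0 3 1).map (fun j => pvPGet p (3 * (2 - i) + j)))))  rest
    else pvLoopB fr fc perm rest

-- one output cell read from the original grid: grid[-1-si] / grid[si], then
-- row[len(row)-1-sj] / row[sj]  (defaults reachable only outside Pre_)
def pvReadF (g : List (List Int)) (fr fc : Bool) (s : Int × Int) : Int :=
  let row := if fr then (PySem.List.pyGet? g (-1 - s.1)).getD []
             else (PySem.List.pyGet? g s.1).getD []
  if fc then (PySem.List.pyGet? row ((row.length : Int) - 1 - s.2)).getD 0
  else (PySem.List.pyGet? row s.2).getD 0

-- the final materialization of Source B from the loop's state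
def pvFinalB (g : List (List Int)) (st : Bool × Bool × Option (List (Int × Int))) :
    List (List Int) :=
  match st with
  | (fr, fc, none) =>
    (if fr then (PySem.List.slice? g none none (-1)).getD [] else g).map
      (fun row => if fc then (PySem.List.slice? row none none (-1)).getD []
                  else PySem.List.slice row none none)
  | (fr, fc, some p) =>
    (PySem.List.pyRange 0 3 1).map (fun i =>
      (PySem.List.pyRange 0 3 1).map (fun j => pvReadF g fr fc (pvPGet p (3 * i + j))))

def execute_actions_alt (grid : List (List Int)) (actions : List Int) : List (List Int) :=
  pvFinalB grid (pvLoopB false false none actions)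

-- ===== PRECONDITION & SPEC =====
-- A raises IndexError when a rotation (action 1, before any submit 4) meets a grid with
-- fewer than 3 rows or a too-short row; Pre_ excludes those, and is slightly narrower
-- than A's exact domain: it asks every row of a rotated grid to have ≥ 3 cells although
-- A only reads three of the rows (on such excluded inputs A and B still agree).
def Pre_execute_actions (grid : List (List Int)) (actions : List Int) : Prop :=
  (1 : Int) ∈ actions.takeWhile (fun a => a != 4) →
    (3 ≤ grid.length ∧ ∀ row ∈ grid, 3 ≤ row.length)
instance (grid : List (List Int)) (actions : List Int) : Decidable (Pre_execute_actions grid actions) := by unfold Pre_execute_actions; infer_instance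
def pvWitness_execute_actions : List (List Int) × List Int :=
  ([[1, 2, 3], [4, 5, 6], [7, 8, 9]], [1, 2, 0, 3, 4, 1])

def Spec_execute_actions (grid : List (List Int)) (actions : List Int) (out : List (List Int)) : Prop := out = execute_actions_alt grid actions
instance (grid : List (List Int)) (actions : List Int) (out : List (List Int)) : Decidable (Spec_execute_actions grid actions out) := by unfold Spec_execute_actions; infer_instance

-- ===== CLAIM (what is proved, stated in full; the proofs are below) =====
def Claim_equal_execute_actions : Prop := ∀ (grid : List (List Int)) (actions : List Int), Dom_execute_actions grid actions → Pre_execute_actions grid actions → Spec_execute_actions grid actions (execute_actions grid actions)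

-- ===== LEMMAS AND PROOFS =====

-- the grid after the flip-only phase
def pvFlip (g : List (List Int)) (fr fc : Bool) : List (List Int) :=
  (if fr then g.reverse else g).map (fun r => if fc then r.reverse else r)

-- a 3x3 grid rendered through a read function and a 9-entry permutation
def pvRender (f : Int × Int → Int) (p : List (Int × Int)) : List (List Int) :=
  [[f (pvPGet p 0), f (pvPGet p 1), f (pvPGet p 2)],
   [f (pvPGet p 3), f (pvPGet p 4), f (pvPGet p 5)],
   [f (pvPGet p 6), f (pvPGet p 7), f (pvPGet p 8)]]

lemma pvCopy_eq_flip (g : List (List Int)) :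
    g.map (fun row => PySem.List.slice row none none) = pvFlip g false false := by
  simp [pvFlip, PySem.List.slice_none_none]

lemma pvFinalB_none (g : List (List Int)) (fr fc : Bool) :
    pvFinalB g (fr, fc, none) = pvFlip g fr fc := by
  cases fr <;> cases fc <;>
    simp [pvFinalB, pvFlip, PySem.List.slice?_none_none_neg_one, PySem.List.slice_none_none]

lemma pvFlip_hstep (g : List (List Int)) (fr fc : Bool) :
    (pvFlip g fr fc).map (fun row => (PySem.List.slice? row none none (-1)).getD [])
      = pvFlip g fr (!fc) := by
  cases fc <;> simp [pvFlip, PySem.List.slice?_none_none_neg_one, Function.comp]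

lemma pvFlip_vstep (g : List (List Int)) (fr fc : Bool) :
    (PySem.List.slice? (pvFlip g fr fc) none none (-1)).getD [] = pvFlip g (!fr) fc := by
  cases fr <;> simp [pvFlip, PySem.List.slice?_none_none_neg_one]

lemma pvRead_entry (g : List (List Int)) (hg : 3 ≤ g.length)
    (hr : ∀ row ∈ g, 3 ≤ row.length) (fr fc : Bool) (si sj : Int)
    (h1 : 0 ≤ si) (h2 : si < 3) (h3 : 0 ≤ sj) (h4 : sj < 3) :
    pvCellA (pvRowA (pvFlip g fr fc) si) sj = pvReadF g fr fc (si, sj) := by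
  obtain ⟨m, rfl⟩ : ∃ m : Nat, si = (m : Int) := ⟨si.toNat, (Int.toNat_of_nonneg h1).symm⟩
  obtain ⟨n, rfl⟩ : ∃ n : Nat, sj = (n : Int) := ⟨sj.toNat, (Int.toNat_of_nonneg h3).symm⟩
  have hm : m < g.length := by omega
  have hmr : m < (if fr then g.reverse else g).length := by cases fr <;> simpa using hm
  have hrowA : pvRowA (pvFlip g fr fc) (m : Int)
      = (if fc then ((if fr then g.reverse else g)[m]'hmr).reverse
         else (if fr then g.reverse else g)[m]'hmr) := by
    simp [pvRowA, pvFlip, List.getElem?_eq_getElem hmr]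
  have hrowB : (if fr then (PySem.List.pyGet? g (-1 - (m : Int))).getD []
      else (PySem.List.pyGet? g (m : Int)).getD []) = (if fr then g.reverse else g)[m]'hmr := by
    cases fr
    · simp [List.getElem?_eq_getElem hm]
    · show (PySem.List.pyGet? g (-1 - (m : Int))).getD [] = g.reverse[m]'(by simpa using hm)
      have hneg : (-1 - (m : Int)) = -(((m + 1 : Nat) : Nat) : Int) := by push_cast; ring
      rw [hneg, PySem.List.pyGet?_neg_natCast g (m+1) (by omega) (by omega)]
      rw [List.getElem?_eq_getElem (show g.length - (m + 1) < g.length by omega)]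
      simp only [Option.getD_some, List.getElem_reverse]
      congr 1
      omega
  have hLmem : (if fr then g.reverse else g)[m]'hmr ∈ g := by
    cases fr
    · simpa using List.getElem_mem _
    · have h := List.getElem_mem (show m < g.reverse.length by simpa using hm)
      simp only [List.mem_reverse] at h
      simpa using h
  have hL : 3 ≤ ((if fr then g.reverse else g)[m]'hmr).length := hr _ hLmem
  rw [hrowA]
  show _ = pvReadF g fr fc ((m : Int), (n : Int))
  simp only [pvReadF]
  rw [hrowB]
  cases fc
  · simp [pvCellA]
  · simp only [reduceIte]
    generalize (if fr then g.reverse else g)[m]'hmr = row at hL ⊢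
    have hidx : ((row.length : Int) - 1 - (n : Int)) = ((row.length - 1 - n : Nat) : Int) := by
      push_cast; omega
    rw [pvCellA, hidx, PySem.List.pyGet?_natCast, PySem.List.pyGet?_natCast]
    rw [List.getElem?_reverse (by omega)]

-- evaluate pvLoopA against pvLoopB/pvFinalB once a permutation exists
set_option maxHeartbeats 1000000 in
lemma pvPermPhase (g : List (List Int)) (fr fc : Bool) :
    ∀ (acts : List Int) (p0 p1 p2 p3 p4 p5 p6 p7 p8 : Int × Int),
      pvLoopA (pvRender (pvReadF g fr fc) [p0, p1, p2, p3, p4, p5, p6, p7, p8]) acts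
        = pvFinalB g (pvLoopB fr fc (some [p0, p1, p2, p3, p4, p5, p6, p7, p8]) acts) := by
  intro acts
  induction acts with
  | nil =>
    intro p0 p1 p2 p3 p4 p5 p6 p7 p8
    simp [pvLoopA, pvLoopB, pvFinalB, pvRender, pvPGet,
      PySem.List.pyRange_one, List.range_succ, PySem.List.pyGet?, PySem.List.pyIdx?]
  | cons a rest ih =>
    intro p0 p1 p2 p3 p4 p5 p6 p7 p8
    by_cases h0 : a = 0
    · subst h0
      rw [pvLoopA, pvLoopB]
      simpa using ih p0 p1 p2 p3 p4 p5 p6 p7 p8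
    · by_cases h1 : a = 1
      · subst h1
        rw [pvLoopA, pvLoopB]
        simpa [pvRender, pvPGet, pvRowA, pvCellA, PySem.List.pyRange_one, List.range_succ,
          PySem.List.pyGet?, PySem.List.pyIdx?, List.flatMap]
          using ih p2 p5 p8 p1 p4 p7 p0 p3 p6
      · by_cases h2 : a = 2
        · subst h2
          rw [pvLoopA, pvLoopB]
          simpa [pvRender, pvPGet, pvRowA, pvCellA, PySem.List.pyRange_one, List.range_succ,
            PySem.List.pyGet?, PySem.List.pyIdx?,
            PySem.List.slice?_none_none_neg_one, List.flatMap]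
            using ih p2 p1 p0 p5 p4 p3 p8 p7 p6
        · by_cases h3 : a = 3
          · subst h3
            rw [pvLoopA, pvLoopB]
            simpa [pvRender, pvPGet, pvRowA, pvCellA, PySem.List.pyRange_one, List.range_succ,
              PySem.List.pyGet?, PySem.List.pyIdx?,
              PySem.List.slice?_none_none_neg_one, List.flatMap]
              using ih p6 p7 p8 p3 p4 p5 p0 p1 p2
          · by_cases h4 : a = 4
            · subst h4
              rw [pvLoopA, pvLoopB]
              simp [pvFinalB, pvRender, pvPGet,
                PySem.List.pyRange_one, List.range_succ, PySem.List.pyGet?, PySem.List.pyIdx?]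
            · rw [pvLoopA, pvLoopB]
              simp only [show (a == 0) = false by simpa using h0,
                show (a == 1) = false by simpa using h1,
                show (a == 2) = false by simpa using h2,
                show (a == 3) = false by simpa using h3,
                show (a == 4) = false by simpa using h4, Bool.false_eq_true, if_false]
              exact ih p0 p1 p2 p3 p4 p5 p6 p7 p8

-- the flip-only phase, switching to pvPermPhase at the first rotation
set_option maxHeartbeats 1000000 in
lemma pvMainPhase (g : List (List Int)) :
    ∀ (acts : List Int) (fr fc : Bool),
      ((1 : Int) ∈ acts.takeWhile (fun a => a != 4) →
        (3 ≤ g.length ∧ ∀ row ∈ g, 3 ≤ row.length)) →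
      pvLoopA (pvFlip g fr fc) acts = pvFinalB g (pvLoopB fr fc none acts) := by
  intro acts
  induction acts with
  | nil => intro fr fc _; rw [pvLoopA, pvLoopB, pvFinalB_none]
  | cons a rest ih =>
    intro fr fc hC
    by_cases h0 : a = 0
    · subst h0
      rw [pvLoopA, pvLoopB]
      simp only [show ((0 : Int) == 0) = true from rfl, if_true]
      exact ih fr fc (fun hm => hC (by
        rw [show ((0 : Int) :: rest).takeWhile (fun a => a != 4)
            = (0 : Int) :: rest.takeWhile (fun a => a != 4) from by simp]
        exact List.mem_cons_of_mem _ hm))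
    · by_cases h1 : a = 1
      · subst h1
        obtain ⟨hg, hr⟩ := hC (by simp)
        rw [pvLoopA, pvLoopB]
        simp only [show ((1 : Int) == 0) = false from rfl,
          show ((1 : Int) == 1) = true from rfl,
          show ((1 : Int) == 4) = false from rfl, Bool.false_eq_true, if_false, if_true]
        have hrot : ((PySem.List.pyRange 0 3 1).map (fun i =>
            (PySem.List.pyRange 0 3 1).map (fun j =>
              pvCellA (pvRowA (pvFlip g fr fc) j) (2 - i))))
            = pvRender (pvReadF g fr fc)
                [(0, 2), (1, 2), (2, 2), (0, 1), (1, 1), (2, 1), (0, 0), (1, 0), (2, 0)] := by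
          simp [pvRead_entry g hg hr fr fc, pvRender, pvPGet, PySem.List.pyRange_one,
            List.range_succ, PySem.List.pyGet?, PySem.List.pyIdx?]
        rw [hrot]
        have hinit : ((PySem.List.pyRange 0 3 1).flatMap (fun i =>
            (PySem.List.pyRange 0 3 1).map (fun j => ((j : Int), 2 - i))))
            = [((0:Int), (2:Int)), (1, 2), (2, 2), (0, 1), (1, 1), (2, 1), (0, 0), (1, 0), (2, 0)] := by
          simp [PySem.List.pyRange_one, List.range_succ, List.flatMap]
        rw [hinit]
        exact pvPermPhase g fr fc rest _ _ _ _ _ _ _ _ _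
      · by_cases h2 : a = 2
        · subst h2
          rw [pvLoopA, pvLoopB]
          simp only [show ((2 : Int) == 0) = false from rfl,
            show ((2 : Int) == 1) = false from rfl, show ((2 : Int) == 2) = true from rfl,
            show ((2 : Int) == 4) = false from rfl, Bool.false_eq_true, if_false, if_true]
          rw [pvFlip_hstep]
          exact ih fr (!fc) (fun hm => hC (by
        rw [show ((2 : Int) :: rest).takeWhile (fun a => a != 4)
            = (2 : Int) :: rest.takeWhile (fun a => a != 4) from by simp]
        exact List.mem_cons_of_mem _ hm))
        · by_cases h3 : a = 3
          · subst h3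
            rw [pvLoopA, pvLoopB]
            simp only [show ((3 : Int) == 0) = false from rfl,
              show ((3 : Int) == 1) = false from rfl, show ((3 : Int) == 2) = false from rfl,
              show ((3 : Int) == 3) = true from rfl, show ((3 : Int) == 4) = false from rfl,
              Bool.false_eq_true, if_false, if_true]
            rw [pvFlip_vstep]
            exact ih (!fr) fc (fun hm => hC (by
        rw [show ((3 : Int) :: rest).takeWhile (fun a => a != 4)
            = (3 : Int) :: rest.takeWhile (fun a => a != 4) from by simp]
        exact List.mem_cons_of_mem _ hm))
          · by_cases h4 : a = 4
            · subst h4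
              rw [pvLoopA, pvLoopB]
              simp [pvFinalB_none]
            · rw [pvLoopA, pvLoopB]
              simp only [show (a == 0) = false by simpa using h0,
                show (a == 1) = false by simpa using h1,
                show (a == 2) = false by simpa using h2,
                show (a == 3) = false by simpa using h3,
                show (a == 4) = false by simpa using h4, Bool.false_eq_true, if_false]
              refine ih fr fc (fun hm => hC ?_)
              have : (a :: rest).takeWhile (fun a => a != 4) = a :: rest.takeWhile (fun a => a != 4) := by
                simp [List.takeWhile_cons, show (a != 4) = true by simpa using h4]
              rw [this]
              exact List.mem_cons_of_mem _ hm

-- ===== VERDICT (by name: the statement is the Claim_ definition above) =====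
theorem execute_actions_spec : Claim_equal_execute_actions := by
  intro grid actions _ hpre
  show execute_actions _ _ = execute_actions_alt _ _
  unfold execute_actions execute_actions_alt
  rw [pvCopy_eq_flip]
  exact pvMainPhase grid actions false false hpre
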